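-- pv_equiv track=rewrite | github.com/starwindz/swos-port | mnu2h/Util.py | withArticle
-- ===== SOURCE A (Python) =====
-- def withArticle(word):
--     assert isinstance(word, str)
--
--     if not word or not word[0].isalpha() or word[-1].lower() == 's':
--         return word
--
--     for article in ('a', 'an', 'the'):
--         if word.startswith(article) and (len(word) == len(article) or word[len(article)].isspace()):
--             return word
--
--     article = 'an' if word[0].lower() in 'aeiou' else 'a'
--     return f'{article} {word}'
-- ===== SOURCE B (Python) =====
-- def withArticle(word):
--     assert isinstance(word, str)
--
--     if not word or not word[0].isalpha() or word[-1].lower() == 's':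
--         return word
--
--     # Walk the word character by character through a trie of the articles;
--     # an article is present iff we reach an accepting node ('' key) right
--     # before end-of-string or a whitespace character.
--     trie = {'a': {'': None, 'n': {'': None}}, 't': {'h': {'e': {'': None}}}}
--     node = trie
--     i = 0
--     has_article = False
--     while True:
--         if '' in node and (i == len(word) or word[i].isspace()):
--             has_article = True
--             break
--         if i < len(word) and word[i] in node:
--             node = node[word[i]]
--             i += 1
--         else:
--             break
--
--     if has_article:
--         return word
--
--     article = 'an' if word[0].lower() in 'aeiou' else 'a'
--     return f'{article} {word}'
-- ===== Notes on version B (the rewrite author's own statement) =====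
-- stated objective: alternative
-- what changed: The loop over the three article strings (per-article prefix scan plus boundary test) is replaced by a single character-level walk of the word through a trie of the articles, accepting when a terminal trie node is reached at end-of-string or before whitespace.
import Mathlib
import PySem

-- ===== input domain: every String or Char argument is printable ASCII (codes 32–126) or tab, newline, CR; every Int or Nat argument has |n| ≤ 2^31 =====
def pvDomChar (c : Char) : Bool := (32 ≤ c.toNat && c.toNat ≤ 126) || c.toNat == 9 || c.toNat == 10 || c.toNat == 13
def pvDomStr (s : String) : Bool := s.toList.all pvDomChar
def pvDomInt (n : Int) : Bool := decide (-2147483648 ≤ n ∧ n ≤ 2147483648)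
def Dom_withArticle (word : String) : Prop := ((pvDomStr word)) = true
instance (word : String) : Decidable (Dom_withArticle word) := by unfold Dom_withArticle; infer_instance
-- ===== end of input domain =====

-- B replaces A's loop over the article strings by a single character-level trie walk; alternative algorithm, same cost.

-- ===== PORT A =====
-- shared guard: `not word or not word[0].isalpha() or word[-1].lower() == 's'` (identical line in A and B)
def pvGuard (wl : List Char) : Bool :=
  wl.isEmpty
    || !(((PySem.List.pyGet? wl 0).map PySem.Chars.isalpha).getD false)
    || ((((PySem.List.pyGet? wl (-1)).map PySem.Chars.lowerChar).getD ' ') == 's')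

-- `word.startswith(article) and (len(word) == len(article) or word[len(article)].isspace())`
-- (the index is in range whenever it is evaluated, so `.getD false` is exact)
def pvArtOk (wl art : List Char) : Bool :=
  PySem.Chars.startswith wl art
    && (wl.length == art.length
        || ((PySem.List.pyGet? wl (art.length : Int)).map PySem.Chars.isspace).getD false)

-- `article = 'an' if word[0].lower() in 'aeiou' else 'a'` (identical line in A and B)
def pvPickArticle (wl : List Char) : List Char :=
  if PySem.Chars.isIn [PySem.Chars.lowerChar ((PySem.List.pyGet? wl 0).getD ' ')] ['a','e','i','o','u']
  then ['a','n'] else ['a']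

def withArticle (word : String) : String :=
  let wl := word.toList
  if pvGuard wl then word
  else if pvArtOk wl ['a'] then word
  else if pvArtOk wl ['a','n'] then word
  else if pvArtOk wl ['t','h','e'] then word
  else String.ofList (pvPickArticle wl ++ [' '] ++ wl)

-- ===== PORT B =====
-- Source B's trie of the articles {'a': {'': None, 'n': {'': None}}, 't': {'h': {'e': {'': None}}}}:
-- its six dict nodes become an enumerated node type (a nested dict is not portable as a Lean
-- nested inductive); `'' in node` is pvTrieAccept, the `word[i] in node` lookup is pvTrieChild.
inductive PvNode
  | root | nA | nAN | nT | nTH | nTHE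
deriving DecidableEq

def pvTrieAccept : PvNode → Bool
  | .nA | .nAN | .nTHE => true
  | _ => false

def pvTrieChild : PvNode → Char → Option PvNode
  | .root, c => if c = 'a' then some .nA else if c = 't' then some .nT else none
  | .nA,   c => if c = 'n' then some .nAN else none
  | .nT,   c => if c = 'h' then some .nTH else none
  | .nTH,  c => if c = 'e' then some .nTHE else none
  | _,     _ => none

-- Source B's while loop; `rest` is word[i:], so `i == len(word)` is rest = [] and word[i] is rest[0]
def pvWalk (node : PvNode) (rest : List Char) : Bool :=
  if pvTrieAccept node && (rest.isEmpty || ((rest[0]?.map PySem.Chars.isspace).getD false)) then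
    true
  else
    match rest with
    | [] => false
    | c :: r =>
      match pvTrieChild node c with
      | some n' => pvWalk n' r
      | none => false

def withArticle_alt (word : String) : String :=
  let wl := word.toList
  if pvGuard wl then word
  else if pvWalk PvNode.root wl then word
  else String.ofList (pvPickArticle wl ++ [' '] ++ wl)

-- ===== PRECONDITION & SPEC =====
def Spec_withArticle (word : String) (out : String) : Prop := out = withArticle_alt word
instance (word : String) (out : String) : Decidable (Spec_withArticle word out) := by unfold Spec_withArticle; infer_instance

-- ===== CLAIM (what is proved, stated in full; the proofs are below) =====
def Claim_equal_withArticle : Prop := ∀ (word : String), Dom_withArticle word → Spec_withArticle word (withArticle word)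

-- ===== LEMMAS AND PROOFS =====

-- boundary test shared by both characterizations
def pvBd (l : List Char) : Bool := l.isEmpty || ((l[0]?.map PySem.Chars.isspace).getD false)

lemma walk_nAN (r : List Char) : pvWalk PvNode.nAN r = pvBd r := by
  cases r <;> simp [pvWalk, pvTrieAccept, pvTrieChild, pvBd]

lemma walk_nTHE (r : List Char) : pvWalk PvNode.nTHE r = pvBd r := by
  cases r <;> simp [pvWalk, pvTrieAccept, pvTrieChild, pvBd]

lemma artOk_a (c : Char) (r : List Char) :
    pvArtOk (c :: r) ['a'] = ((c == 'a') && pvBd r) := by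
  simp only [pvArtOk, pvBd, PySem.Chars.startswith, PySem.List.pyGet?_natCast]
  cases r <;> by_cases hc : c = 'a' <;> simp [hc, List.isPrefixOf, BEq.comm]

lemma artOk_an (c : Char) (r : List Char) :
    pvArtOk (c :: r) ['a','n'] =
      ((c == 'a') && (match r with | c2 :: r2 => (c2 == 'n') && pvBd r2 | [] => false)) := by
  simp only [pvArtOk, pvBd, PySem.Chars.startswith, PySem.List.pyGet?_natCast]
  cases r with
  | nil => by_cases hc : c = 'a' <;> simp [hc, List.isPrefixOf, BEq.comm]
  | cons c2 r2 =>
    cases r2 <;> by_cases hc : c = 'a' <;> by_cases hc2 : c2 = 'n' <;>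
      simp [hc, hc2, List.isPrefixOf, BEq.comm, Bool.and_assoc]

lemma artOk_the (c : Char) (r : List Char) :
    pvArtOk (c :: r) ['t','h','e'] =
      ((c == 't') && (match r with
        | c2 :: c3 :: r3 => (c2 == 'h') && ((c3 == 'e') && pvBd r3)
        | _ => false)) := by
  simp only [pvArtOk, pvBd, PySem.Chars.startswith, PySem.List.pyGet?_natCast]
  cases r with
  | nil => by_cases hc : c = 't' <;> simp [hc, List.isPrefixOf, BEq.comm]
  | cons c2 r2 =>
    cases r2 with
    | nil =>
      by_cases hc : c = 't' <;> by_cases hc2 : c2 = 'h' <;>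
        simp [hc, hc2, List.isPrefixOf, BEq.comm]
    | cons c3 r3 =>
      cases r3 <;> by_cases hc : c = 't' <;> by_cases hc2 : c2 = 'h' <;>
        by_cases hc3 : c3 = 'e' <;>
          simp [hc, hc2, hc3, List.isPrefixOf, BEq.comm, Bool.and_assoc]

-- the trie walk from the root accepts exactly when one of A's three per-article tests does
lemma walk_root (l : List Char) :
    pvWalk PvNode.root l
      = (pvArtOk l ['a'] || pvArtOk l ['a','n'] || pvArtOk l ['t','h','e']) := by
  cases l with
  | nil => decide
  | cons c r =>
    rw [artOk_a, artOk_an, artOk_the]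
    by_cases hc : c = 'a'
    · subst hc
      have h1 : pvWalk PvNode.root ('a' :: r) = pvWalk PvNode.nA r := by
        simp [pvWalk, pvTrieAccept, pvTrieChild]
      rw [h1]
      cases r with
      | nil => decide
      | cons c2 r2 =>
        by_cases hc2 : c2 = 'n'
        · subst hc2
          have h2 : pvWalk PvNode.nA ('n' :: r2) =
              (pvBd ('n' :: r2) || pvWalk PvNode.nAN r2) := by
            by_cases hb : pvBd ('n' :: r2) = true <;>
              simp [pvWalk, pvTrieAccept, pvTrieChild, pvBd] at hb ⊢ <;> simp_all
          rw [h2, walk_nAN]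
          simp [pvBd]
        · have h2 : pvWalk PvNode.nA (c2 :: r2) = pvBd (c2 :: r2) := by
            by_cases hb : pvBd (c2 :: r2) = true <;>
              simp [pvWalk, pvTrieAccept, pvTrieChild, pvBd, hc2] at hb ⊢ <;> simp_all
          rw [h2]
          simp [pvBd, hc2]
    · by_cases hc' : c = 't'
      · subst hc'
        have h1 : pvWalk PvNode.root ('t' :: r) = pvWalk PvNode.nT r := by
          simp [pvWalk, pvTrieAccept, pvTrieChild]
        rw [h1]
        simp only [show (('t' : Char) == 'a') = false from by decide, Bool.false_and,
          Bool.false_or]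
        cases r with
        | nil => decide
        | cons c2 r2 =>
          by_cases hc2 : c2 = 'h'
          · subst hc2
            have h2 : pvWalk PvNode.nT ('h' :: r2) = pvWalk PvNode.nTH r2 := by
              simp [pvWalk, pvTrieAccept, pvTrieChild]
            rw [h2]
            cases r2 with
            | nil => decide
            | cons c3 r3 =>
              by_cases hc3 : c3 = 'e'
              · subst hc3
                have h3 : pvWalk PvNode.nTH ('e' :: r3) = pvWalk PvNode.nTHE r3 := by
                  simp [pvWalk, pvTrieAccept, pvTrieChild]
                rw [h3, walk_nTHE]
                simp
              · have h3 : pvWalk PvNode.nTH (c3 :: r3) = false := by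
                  simp [pvWalk, pvTrieAccept, pvTrieChild, hc3]
                rw [h3]; simp [hc3]
          · have h2 : pvWalk PvNode.nT (c2 :: r2) = false := by
              simp [pvWalk, pvTrieAccept, pvTrieChild, hc2]
            rw [h2]; cases r2 <;> simp [hc2]
      · have h1 : pvWalk PvNode.root (c :: r) = false := by
          simp [pvWalk, pvTrieAccept, pvTrieChild, hc, hc']
        rw [h1]; simp [hc, hc']

-- ===== VERDICT (by name: the statement is the Claim_ definition above) =====
theorem withArticle_spec : Claim_equal_withArticle := by
  intro word _
  unfold Spec_withArticle withArticle withArticle_alt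
  cases hg : pvGuard word.toList with
  | true => simp [hg]
  | false =>
    simp only [hg, Bool.false_eq_true, if_false]
    rw [walk_root]
    by_cases h1 : pvArtOk word.toList ['a'] = true <;>
      by_cases h2 : pvArtOk word.toList ['a','n'] = true <;>
        by_cases h3 : pvArtOk word.toList ['t','h','e'] = true <;>
          simp [h1, h2, h3]
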